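-- pv_equiv track=rewrite | github.com/minhchauU23/PythonCodePtit | PY01019_KHOANG_CACH_KY_TU.py | checkDistanChars
-- ===== SOURCE A (Python) =====
-- def checkDistanChars(s):
--     i, j = 0, len(s) - 1
--     while i  < j:
--         if abs(ord(s[i]) - ord(s[i+1])) != abs(ord(s[j]) - ord(s[j -1])):
--             return "NO"
--         i += 1
--         j -= 1
--     return "YES"
-- ===== SOURCE B (Python) =====
-- def checkDistanChars(s):
--     d = [abs(ord(s[k]) - ord(s[k + 1])) for k in range(len(s) - 1)]
--     return "YES" if d == d[::-1] else "NO"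
-- ===== Notes on version B (the rewrite author's own statement) =====
-- stated objective: simpler
-- what changed: B materializes the list of adjacent character distances with a comprehension and tests it against its reverse, instead of A's in-place two-pointer early-exit index scan.
import Mathlib
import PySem

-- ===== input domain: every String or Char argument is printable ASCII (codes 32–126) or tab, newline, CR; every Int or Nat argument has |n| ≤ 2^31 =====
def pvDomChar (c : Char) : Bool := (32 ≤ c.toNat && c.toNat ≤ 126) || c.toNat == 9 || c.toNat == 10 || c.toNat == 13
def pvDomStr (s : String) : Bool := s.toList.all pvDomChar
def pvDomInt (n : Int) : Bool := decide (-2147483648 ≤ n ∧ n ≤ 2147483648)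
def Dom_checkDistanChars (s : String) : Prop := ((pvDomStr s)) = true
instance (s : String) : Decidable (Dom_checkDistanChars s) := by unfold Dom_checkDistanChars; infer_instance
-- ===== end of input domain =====

-- B replaces A's two-pointer early-exit index scan by materializing the adjacent-distance
-- list and comparing it with its reverse (objective: simpler).

-- ===== PORT A =====
-- ord(s[k]): the loop only ever uses in-range indices, so the getD default ' ' is never hit
def pvOrdA (l : List Char) (k : Int) : Int := (((PySem.List.pyGet? l k).getD ' ').toNat : Int)

def pvLoopA (l : List Char) (i j : Int) : String :=
  if _h : i < j then
    if |pvOrdA l i - pvOrdA l (i + 1)| ≠ |pvOrdA l j - pvOrdA l (j - 1)| then "NO"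
    else pvLoopA l (i + 1) (j - 1)
  else "YES"
termination_by (j - i).toNat
decreasing_by omega

def checkDistanChars (s : String) : String :=
  pvLoopA s.toList 0 ((s.toList.length : Int) - 1)

-- ===== PORT B =====
def pvOrdB (l : List Char) (k : Int) : Int := (((PySem.List.pyGet? l k).getD ' ').toNat : Int)

def checkDistanChars_alt (s : String) : String :=
  let l := s.toList
  let d := (PySem.List.pyRange 0 ((l.length : Int) - 1) 1).map
    (fun k => |pvOrdB l k - pvOrdB l (k + 1)|)
  -- d[::-1] is List.reverse (PySem.List.slice?_none_none_neg_one)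
  if d = d.reverse then "YES" else "NO"

-- ===== PRECONDITION & SPEC =====
def Spec_checkDistanChars (s : String) (out : String) : Prop := out = checkDistanChars_alt s
instance (s : String) (out : String) : Decidable (Spec_checkDistanChars s out) := by unfold Spec_checkDistanChars; infer_instance

-- ===== CLAIM (what is proved, stated in full; the proofs are below) =====
def Claim_equal_checkDistanChars : Prop := ∀ (s : String), Dom_checkDistanChars s → Spec_checkDistanChars s (checkDistanChars s)

-- ===== LEMMAS AND PROOFS =====

def pvD (l : List Char) (k : Nat) : Int := |pvOrdB l (k : Int) - pvOrdB l ((k : Int) + 1)|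

lemma pvOrd_eq : pvOrdA = pvOrdB := rfl

-- A's loop at the invariant point j = n-1-i returns "YES" iff all remaining checks pass
lemma pvLoopA_yes (l : List Char) (i : Nat) :
    pvLoopA l i ((l.length : Int) - 1 - i) = "YES" ↔
      ∀ k, i ≤ k → 2 * k + 1 < l.length → pvD l k = pvD l (l.length - 2 - k) := by
  generalize hfuel : l.length - i = t
  induction t generalizing i with
  | zero =>
    rw [pvLoopA]
    have hni : l.length ≤ i := by omega
    rw [dif_neg (by omega)]
    simp only [true_iff]
    intro k hk hlt
    omega
  | succ t ih =>
    rw [pvLoopA]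
    by_cases h : (i : Int) < (l.length : Int) - 1 - i
    · rw [dif_pos h]
      have hi2 : 2 * i + 1 < l.length := by omega
      have hj1 : ((l.length : Int) - 1 - i) - 1 = ((l.length - 2 - i : Nat) : Int) := by
        push_cast; omega
      have hcond : |pvOrdA l i - pvOrdA l (i + 1)| =
          |pvOrdA l ((l.length : Int) - 1 - i) - pvOrdA l ((l.length : Int) - 1 - i - 1)| ↔
          pvD l i = pvD l (l.length - 2 - i) := by
        rw [pvOrd_eq, hj1]
        have hj : ((l.length : Int) - 1 - i) = ((l.length - 2 - i : Nat) : Int) + 1 := by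
          push_cast; omega
        rw [hj, abs_sub_comm (pvOrdB l (((l.length - 2 - i : Nat) : Int) + 1))]
        unfold pvD
        constructor <;> intro hx <;> omega
      by_cases hc : pvD l i = pvD l (l.length - 2 - i)
      · rw [if_neg (by simpa [hcond] using hc)]
        have harg1 : (i : Int) + 1 = ((i + 1 : Nat) : Int) := by push_cast; ring
        have harg2 : (l.length : Int) - 1 - i - 1 = (l.length : Int) - 1 - ((i + 1 : Nat) : Int) := by
          push_cast; ring
        rw [harg2, harg1, ih (i + 1) (by omega)]
        constructor
        · intro hall k hk hlt
          rcases Nat.eq_or_lt_of_le hk with rfl | hk'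
          · exact hc
          · exact hall k hk' hlt
        · intro hall k hk hlt
          exact hall k (by omega) hlt
      · rw [if_pos (by simpa [hcond] using hc)]
        constructor
        · intro hno; exact absurd hno (by decide)
        · intro hall
          exact absurd (hall i (le_refl i) hi2) hc
    · rw [dif_neg h]
      simp only [true_iff]
      intro k hk hlt
      omega

lemma pvLoopA_cases (l : List Char) (i j : Int) :
    pvLoopA l i j = "YES" ∨ pvLoopA l i j = "NO" := by
  fun_induction pvLoopA l i j with
  | case1 => right; rfl
  | case2 _ _ _ _ ih => exact ih
  | case3 => left; rfl

-- the materialized distance list is the map of pvD over range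
lemma dB_eq (l : List Char) :
    (PySem.List.pyRange 0 ((l.length : Int) - 1) 1).map
      (fun k => |pvOrdB l k - pvOrdB l (k + 1)|) =
    (List.range (l.length - 1)).map (pvD l) := by
  rw [PySem.List.pyRange_one]
  have : ((l.length : Int) - 1 - 0).toNat = l.length - 1 := by omega
  rw [this, List.map_map]
  apply List.map_congr_left
  intro k hk
  simp only [Function.comp_apply, pvD, zero_add]

lemma palindrome_iff (xs : List Int) :
    xs = xs.reverse ↔ ∀ k, (h : k < xs.length) → xs[k] = xs[xs.length - 1 - k]'(by omega) := by
  constructor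
  · intro hrev k hk
    rw [List.getElem_of_eq hrev hk, List.getElem_reverse]
  · intro hall
    apply List.ext_getElem (by simp)
    intro k hk hk'
    rw [List.getElem_reverse]
    exact hall k hk

lemma half_iff_full (l : List Char) :
    (∀ k, 0 ≤ k → 2 * k + 1 < l.length → pvD l k = pvD l (l.length - 2 - k)) ↔
      (∀ k, k < l.length - 1 → pvD l k = pvD l (l.length - 2 - k)) := by
  constructor
  · intro hhalf k hk
    by_cases h2 : 2 * k + 1 < l.length
    · exact hhalf k (Nat.zero_le k) h2
    · have := hhalf (l.length - 2 - k) (Nat.zero_le _) (by omega)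
      have heq : l.length - 2 - (l.length - 2 - k) = k := by omega
      rw [heq] at this
      exact this.symm
  · intro hfull k _ h2
    exact hfull k (by omega)

-- ===== VERDICT (by name: the statement is the Claim_ definition above) =====
theorem checkDistanChars_spec : Claim_equal_checkDistanChars := by
  intro s _
  unfold Spec_checkDistanChars checkDistanChars checkDistanChars_alt
  dsimp only
  set l := s.toList with hl
  rw [dB_eq]
  have hA : pvLoopA l 0 ((l.length : Int) - 1) = "YES" ↔
      ∀ k, k < l.length - 1 → pvD l k = pvD l (l.length - 2 - k) := by
    have := pvLoopA_yes l 0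
    simp only [Nat.cast_zero, sub_zero] at this
    rw [this]
    exact half_iff_full l
  have hpal : (List.range (l.length - 1)).map (pvD l) =
        ((List.range (l.length - 1)).map (pvD l)).reverse ↔
      ∀ k, k < l.length - 1 → pvD l k = pvD l (l.length - 2 - k) := by
    rw [palindrome_iff]
    simp only [List.length_map, List.length_range, List.getElem_map, List.getElem_range]
    constructor
    · intro h k hk
      have := h k hk
      have heq : l.length - 1 - 1 - k = l.length - 2 - k := by omega
      rw [heq] at this
      exact this
    · intro h k hk
      have := h k hk
      have heq : l.length - 1 - 1 - k = l.length - 2 - k := by omega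
      rw [heq]
      exact this
  by_cases hc : ∀ k, k < l.length - 1 → pvD l k = pvD l (l.length - 2 - k)
  · rw [if_pos (hpal.mpr hc), hA.mpr hc]
  · rw [if_neg (fun h => hc (hpal.mp h))]
    rcases pvLoopA_cases l 0 ((l.length : Int) - 1) with h | h
    · exact absurd (hA.mp h) hc
    · exact h
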